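-- pv_equiv track=rewrite | github.com/mrbartrns/programmers-algorithm | lv2/kakao_relation_key.py | make_keys
-- ===== SOURCE A (Python) =====
-- def make_keys(n):
--     arr = [i for i in range(n)]
--     result = []
--     for i in range(1 << len(arr)):
--         temp = []
--         for j in range(len(arr)):
--             if i & (1 << j):
--                 temp.append(arr[j])
--         if temp:
--             result.append(temp)
--     result.sort(key=lambda x: len(x))
--     return result
-- ===== SOURCE B (Python) =====
-- def make_keys(n):
--     # Group subsets by size with per-size filter passes instead of a comparison sort.
--     m = max(n, 0)
--     subsets = [[j for j in range(m) if i & (1 << j)] for i in range(1 << m)]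
--     result = []
--     for size in range(1, m + 1):
--         result += [s for s in subsets if len(s) == size]
--     return result
-- ===== Notes on version B (the rewrite author's own statement) =====
-- stated objective: alternative
-- what changed: B replaces A's append-loops plus stable comparison sort by length with a bucket/grouping scheme: it builds each subset by a comprehension and concatenates per-size filter passes for size = 1..n, never calling sort.
import Mathlib
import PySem

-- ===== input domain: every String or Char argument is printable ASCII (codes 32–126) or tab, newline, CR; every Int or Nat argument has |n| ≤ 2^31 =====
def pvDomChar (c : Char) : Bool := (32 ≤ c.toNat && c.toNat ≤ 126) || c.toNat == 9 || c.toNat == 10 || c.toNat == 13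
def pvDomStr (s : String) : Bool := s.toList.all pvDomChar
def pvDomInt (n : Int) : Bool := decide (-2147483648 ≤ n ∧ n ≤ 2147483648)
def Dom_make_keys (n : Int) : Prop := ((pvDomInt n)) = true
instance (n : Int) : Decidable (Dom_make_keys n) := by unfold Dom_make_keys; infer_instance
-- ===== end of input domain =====

-- B groups the bitmask-enumerated subsets by size with per-size filter passes instead of A's append-loops plus stable sort by length (objective: alternative).


-- Python's `1 << k` for k ≥ 0 (pinned to the Int <<< Nat instance)
def pyShl1 (k : Nat) : Int := (1 : Int) <<< k

-- ===== PORT A =====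
def make_keys (n : Int) : List (List Int) :=
  let arr : List Int := PySem.List.pyRange 0 n 1
  let result : List (List Int) :=
    (PySem.List.pyRange 0 (pyShl1 arr.length) 1).foldl
      (fun result i =>
        let temp : List Int :=
          (PySem.List.pyRange 0 (PySem.List.len arr) 1).foldl
            (fun temp j =>
              -- `if i & (1 << j):` — j comes from range(len(arr)), so 0 ≤ j and `.toNat` is exact
              if PySem.Int.band i (pyShl1 j.toNat) ≠ 0 then
                temp ++ [PySem.List.pyGetD arr j 0]
              else temp) []
        if temp ≠ [] then result ++ [temp] else result) []
  PySem.List.sorted result (fun x => PySem.List.len x) false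

-- ===== PORT B =====
def make_keys_alt (n : Int) : List (List Int) :=
  let m : Int := max n 0
  let subsets : List (List Int) :=
    (PySem.List.pyRange 0 (pyShl1 m.toNat) 1).map
      (fun i =>
        -- `[j for j in range(m) if i & (1 << j)]`; 0 ≤ j so `.toNat` is exact
        (PySem.List.pyRange 0 m 1).filter
          (fun j => decide (PySem.Int.band i (pyShl1 j.toNat) ≠ 0)))
  (PySem.List.pyRange 1 (m + 1) 1).foldl
    (fun result size =>
      result ++ subsets.filter (fun s => decide (PySem.List.len s = size))) []

-- ===== PRECONDITION & SPEC =====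
def Spec_make_keys (n : Int) (out : List (List Int)) : Prop := out = make_keys_alt n
instance (n : Int) (out : List (List Int)) : Decidable (Spec_make_keys n out) := by unfold Spec_make_keys; infer_instance

-- ===== CLAIM (what is proved, stated in full; the proofs are below) =====
def Claim_equal_make_keys : Prop := ∀ (n : Int), Dom_make_keys n → Spec_make_keys n (make_keys n)

-- ===== LEMMAS AND PROOFS =====

-- the subset selected by bitmask i, with m = n.toNat
def pvSubset (m : Nat) (i : Int) : List Int :=
  (PySem.List.pyRange 0 (m : Int) 1).filter
    (fun j => decide (PySem.Int.band i (pyShl1 j.toNat) ≠ 0))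

-- inserting x between a prefix it does not go before and a suffix it goes before
lemma insertBy_middle {α : Type} (bf : α → α → Bool) (x : α) (P S : List α)
    (hP : ∀ y ∈ P, bf x y = false) (hS : ∀ y ∈ S, bf x y = true) :
    PySem.List.insertBy bf x (P ++ S) = P ++ x :: S := by
  induction P with
  | nil =>
    cases S with
    | nil => simp [PySem.List.insertBy]
    | cons s t => simp [PySem.List.insertBy, hS s (by simp)]
  | cons p P ih =>
    have hbf : bf x p = false := hP p (by simp)
    simp only [List.cons_append, PySem.List.insertBy, hbf, Bool.false_eq_true, if_false]
    rw [ih (fun y hy => hP y (List.mem_cons_of_mem _ hy))]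

-- stable sort by length equals concatenation of the per-length filters, for lengths in 1..m
lemma sorted_len_buckets (m : Nat) (xs : List (List Int))
    (h : ∀ s ∈ xs, 1 ≤ s.length ∧ s.length ≤ m) :
    PySem.List.sorted xs (fun s => (s.length : Int)) false =
      (List.range m).flatMap (fun k => xs.filter (fun s => decide (s.length = k + 1))) := by
  induction xs using List.reverseRecOn with
  | nil => rw [PySem.List.sorted_eq_foldl_insertBy]; simp
  | append_singleton xs x ih =>
    obtain ⟨h1, h2⟩ := h x (by simp)
    have hx : ∀ s ∈ xs, 1 ≤ s.length ∧ s.length ≤ m := fun s hs => h s (by simp [hs])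
    have hsorted : PySem.List.sorted (xs ++ [x]) (fun s => (s.length : Int)) false
        = PySem.List.insertBy (fun a b => decide ((a.length : Int) < (b.length : Int))) x
            (PySem.List.sorted xs (fun s => (s.length : Int)) false) := by
      rw [PySem.List.sorted_eq_foldl_insertBy, PySem.List.sorted_eq_foldl_insertBy,
        List.foldl_append]
      simp
    set l := x.length with hl
    have hrange : List.range m = List.range l ++ (List.range (m - l)).map (fun k => l + k) := by
      conv_lhs => rw [show m = l + (m - l) by omega]
      exact List.range_add
    rw [hsorted, ih hx, hrange]
    rw [List.flatMap_append, List.flatMap_append, List.flatMap_map, List.flatMap_map]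
    -- the high buckets are unchanged by appending x
    have hhigh : ((List.range (m - l)).flatMap
          (fun k => (xs ++ [x]).filter (fun s => decide (s.length = l + k + 1))))
        = (List.range (m - l)).flatMap
          (fun k => xs.filter (fun s => decide (s.length = l + k + 1))) := by
      refine List.flatMap_congr (fun k _ => ?_)
      rw [List.filter_append]
      have : [x].filter (fun s => decide (s.length = l + k + 1)) = [] := by
        simp only [List.filter_cons, List.filter_nil]
        rw [if_neg]; simp only [decide_eq_true_eq]; omega
      simp [this]
    -- the low buckets gain exactly [x] at the very end
    have hlow : ((List.range l).flatMap
          (fun k => (xs ++ [x]).filter (fun s => decide (s.length = k + 1))))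
        = ((List.range l).flatMap (fun k => xs.filter (fun s => decide (s.length = k + 1)))) ++ [x] := by
      conv_lhs => rw [show l = (l - 1) + 1 by omega, List.range_succ]
      conv_rhs => rw [show l = (l - 1) + 1 by omega, List.range_succ]
      rw [List.flatMap_append, List.flatMap_append]
      have hsmall : ((List.range (l - 1)).flatMap
            (fun k => (xs ++ [x]).filter (fun s => decide (s.length = k + 1))))
          = (List.range (l - 1)).flatMap (fun k => xs.filter (fun s => decide (s.length = k + 1))) := by
        refine List.flatMap_congr (fun k hk => ?_)
        have hkl : k < l - 1 := List.mem_range.mp hk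
        rw [List.filter_append]
        have : [x].filter (fun s => decide (s.length = k + 1)) = [] := by
          simp only [List.filter_cons, List.filter_nil]
          rw [if_neg]; simp only [decide_eq_true_eq]; omega
        simp [this]
      rw [hsmall]
      have hxsel : [x].filter (fun s => decide (s.length = l - 1 + 1)) = [x] := by
        simp only [List.filter_cons, List.filter_nil]
        rw [if_pos]; simp only [decide_eq_true_eq]; omega
      simp [List.filter_append, hxsel]
    rw [hhigh, hlow]
    rw [insertBy_middle]
    · simp
    · intro y hy
      rcases List.mem_flatMap.mp hy with ⟨k, hk, hyk⟩
      have hkl : k < l := List.mem_range.mp hk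
      have : y.length = k + 1 := by simpa using (List.mem_filter.mp hyk).2
      simp only [decide_eq_false_iff_not, not_lt]
      exact_mod_cast (by omega : y.length ≤ l)
    · intro y hy
      rcases List.mem_flatMap.mp hy with ⟨k, _, hyk⟩
      have : y.length = l + k + 1 := by simpa using (List.mem_filter.mp hyk).2
      simp only [decide_eq_true_eq]
      exact_mod_cast (by omega : l < y.length)

-- A's inner loop builds exactly pvSubset n.toNat i
lemma tempA_eq (n i : Int) :
    ((PySem.List.pyRange 0 (PySem.List.len (PySem.List.pyRange 0 n 1)) 1).foldl
        (fun temp j =>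
          if PySem.Int.band i (pyShl1 j.toNat) ≠ 0 then
            temp ++ [PySem.List.pyGetD (PySem.List.pyRange 0 n 1) j 0]
          else temp) [])
      = pvSubset n.toNat i := by
  rw [PySem.List.foldl_append_ite (p := fun j => PySem.Int.band i (pyShl1 j.toNat) ≠ 0)
    (f := fun j => PySem.List.pyGetD (PySem.List.pyRange 0 n 1) j 0)]
  have hlen : PySem.List.len (PySem.List.pyRange 0 n 1) = (n.toNat : Int) := by
    simp [PySem.List.len_eq, PySem.List.length_pyRange_one]
  rw [hlen]
  unfold pvSubset
  rw [List.nil_append]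
  refine (List.map_congr_left ?_).trans (List.map_id' _)
  intro j hj
  have hj' := PySem.List.mem_pyRange_one.mp (List.mem_of_mem_filter hj)
  have hjn : j < n := by omega
  have := PySem.List.pyGetD_map_pyRange_of_nonneg (fun x => x) n j 0 hj'.1 hjn
  simpa using this

-- every bitmask-subset has length ≤ m
lemma pvSubset_len_le (m : Nat) (i : Int) : (pvSubset m i).length ≤ m := by
  unfold pvSubset
  calc (_ : List Int).length ≤ (PySem.List.pyRange 0 (m : Int) 1).length :=
        List.length_filter_le _ _
    _ = m := by rw [PySem.List.length_pyRange_one]; omega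

theorem pv_main (n : Int) : make_keys n = make_keys_alt n := by
  unfold make_keys make_keys_alt
  have hmax : (max n 0).toNat = n.toNat := by omega
  have hmaxc : max n 0 = ((n.toNat : Int)) := by omega
  have hlenarr : (PySem.List.pyRange 0 n 1).length = n.toNat := by
    rw [PySem.List.length_pyRange_one]; omega
  simp only [hmaxc, hlenarr]
  set m : Nat := n.toNat with hm
  -- A side: rewrite inner loop, then outer loop
  have hA : ((PySem.List.pyRange 0 (pyShl1 m) 1).foldl
      (fun result i =>
        let temp : List Int :=
          (PySem.List.pyRange 0 (PySem.List.len (PySem.List.pyRange 0 n 1)) 1).foldl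
            (fun temp j =>
              if PySem.Int.band i (pyShl1 j.toNat) ≠ 0 then
                temp ++ [PySem.List.pyGetD (PySem.List.pyRange 0 n 1) j 0]
              else temp) []
        if temp ≠ [] then result ++ [temp] else result) [])
      = ((PySem.List.pyRange 0 (pyShl1 m) 1).map
          (pvSubset m)).filter (fun s => decide (s ≠ [])) := by
    rw [PySem.List.foldl_congr_mem _ _
      (fun acc i => if pvSubset m i ≠ [] then acc ++ [pvSubset m i] else acc) _
      (by intro acc i _; simp only [tempA_eq n i, hm])]
    rw [PySem.List.foldl_append_ite (p := fun i => pvSubset m i ≠ []) (f := pvSubset m)]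
    rw [List.nil_append, List.filter_map]
    rfl
  rw [hA]
  -- B side: the subset builder is pvSubset m, and the final loop is a flatMap over sizes
  have hsub : (fun i => (PySem.List.pyRange 0 (m : Int) 1).filter
      (fun j => decide (PySem.Int.band i (pyShl1 j.toNat) ≠ 0))) = pvSubset m := rfl
  rw [hsub, PySem.List.foldl_append_eq_flatMap, List.nil_append]
  have hsizes : PySem.List.pyRange 1 ((m : Int) + 1) 1
      = (List.range m).map (fun k : Nat => (1 : Int) + (k : Int)) := by
    have h1 : ((m : Int) + 1 - 1) = (m : Int) := by ring
    rw [PySem.List.pyRange_one, h1, Int.toNat_natCast]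
  rw [hsizes, List.flatMap_map]
  -- per-size filters over all subsets = per-size filters over the nonempty ones
  have hfilters : ∀ k : Nat,
      (((PySem.List.pyRange 0 (pyShl1 m) 1).map (pvSubset m)).filter
        (fun s => decide (PySem.List.len s = (1 : Int) + k)))
      = ((((PySem.List.pyRange 0 (pyShl1 m) 1).map (pvSubset m)).filter
          (fun s => decide (s ≠ []))).filter (fun s => decide (s.length = k + 1))) := by
    intro k
    rw [List.filter_filter]
    refine List.filter_congr (fun s _ => ?_)
    simp only [PySem.List.len_eq]
    by_cases h : s.length = k + 1
    · have hne : s ≠ [] := by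
        intro he; rw [he] at h; simp at h
      simp only [h, hne, decide_true, ne_eq, not_false_eq_true, Bool.and_true,
        decide_eq_true_eq]
      omega
    · have h' : ¬ ((s.length : Int) = 1 + (k : Int)) := by
        intro hc; apply h; omega
      simp [h, h']
  -- apply the bucket characterisation of the stable sort
  have hlen2 : ∀ s ∈ (((PySem.List.pyRange 0 (pyShl1 m) 1).map (pvSubset m)).filter
      (fun s => decide (s ≠ []))), 1 ≤ s.length ∧ s.length ≤ m := by
    intro s hs
    have hs1 := List.mem_filter.mp hs
    rcases List.mem_map.mp hs1.1 with ⟨i, _, hi⟩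
    have hne : s ≠ [] := by simpa using hs1.2
    constructor
    · have := List.length_pos_iff.mpr hne; omega
    · rw [← hi]; exact pvSubset_len_le m i
  have hkey : (fun x : List Int => PySem.List.len x) = (fun s : List Int => (s.length : Int)) := by
    funext s; simp [PySem.List.len_eq]
  rw [hkey, sorted_len_buckets m _ hlen2]
  refine List.flatMap_congr (fun k _ => ?_)
  exact (hfilters k).symm

-- ===== VERDICT (by name: the statement is the Claim_ definition above) =====
theorem make_keys_spec : Claim_equal_make_keys := by
  intro n _
  unfold Spec_make_keys
  exact pv_main n
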